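-- pv_equiv track=rewrite | github.com/zhenfelix/OnlineJudgeCodings | LeetCode/1183. Maximum Number of Ones/solution.py | maximumNumberOfOnes
-- ===== SOURCE A (Python) =====
-- def maximumNumberOfOnes(C, R, K, maxOnes):
--     # every K*K square has at most maxOnes ones
--     count = [0] * (K*K)
--     for r in range(R):
--         for c in range(C):
--             code = (r%K) * K + c%K
--             count[code] += 1
--     count.sort()
--     ans = 0
--     for _ in range(maxOnes):
--         ans += count.pop()
--     return ans
-- ===== SOURCE B (Python) =====
-- def maximumNumberOfOnes(C, R, K, maxOnes):
--     # Cell (r, c) belongs to residue class (r % K, c % K); a best square board puts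
--     # ones in whole classes.  Class counts take only 4 distinct values, computed in
--     # O(1) from divmod: rows split into R%K "tall" residues (R//K + 1 rows) and the
--     # rest (R//K rows), likewise columns.  Greedily take maxOnes cells from the
--     # groups in descending value order.
--     R0 = max(R, 0)
--     C0 = max(C, 0)
--     qr, rr = divmod(R0, K)
--     qc, rc = divmod(C0, K)
--     groups = [((qr + 1) * (qc + 1), rr * rc),
--               ((qr + 1) * qc,       rr * (K - rc)),
--               (qr * (qc + 1),       (K - rr) * rc),
--               (qr * qc,             (K - rr) * (K - rc))]
--     groups.sort(key=lambda g: g[0], reverse=True)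
--     ans = 0
--     remaining = maxOnes
--     for val, cnt in groups:
--         take = min(remaining, cnt)
--         ans += take * val
--         remaining -= take
--     return ans
-- ===== Notes on version B (the rewrite author's own statement) =====
-- stated objective: faster
-- what changed: B replaces A's O(R*C) per-cell tally and O(K^2 log K) sort of all K*K residue-class counts with an O(1) closed form: divmod splits rows/columns into tall/short residues, giving only 4 distinct class values with multiplicities, sorted descending and consumed greedily.
-- outside the precondition, e.g. on maximumNumberOfOnes(2, 2, 2, -1): A returns 0, B returns -4; on maximumNumberOfOnes(2, 2, -2, 1): A returns 1, B returns 1; on maximumNumberOfOnes(0, 5, 0, 0): A returns 0, B raises ZeroDivisionError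
import Mathlib
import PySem

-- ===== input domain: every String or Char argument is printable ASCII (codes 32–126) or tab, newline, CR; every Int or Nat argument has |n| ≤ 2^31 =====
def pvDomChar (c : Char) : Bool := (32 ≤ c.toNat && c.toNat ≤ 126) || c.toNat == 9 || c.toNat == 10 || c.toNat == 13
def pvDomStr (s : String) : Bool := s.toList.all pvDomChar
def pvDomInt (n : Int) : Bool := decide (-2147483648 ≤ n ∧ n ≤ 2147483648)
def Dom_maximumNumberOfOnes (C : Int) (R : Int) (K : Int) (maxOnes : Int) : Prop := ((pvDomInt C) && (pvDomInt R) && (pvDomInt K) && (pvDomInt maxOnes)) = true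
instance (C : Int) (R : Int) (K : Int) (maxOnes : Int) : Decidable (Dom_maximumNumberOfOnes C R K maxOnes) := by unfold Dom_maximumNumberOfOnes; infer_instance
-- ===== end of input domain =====

-- B replaces A's O(R*C) cell tally and sort of all K*K residue-class counts with an
-- O(1) closed form: divmod gives 4 distinct class values with multiplicities,
-- consumed greedily in descending order.

-- ===== PORT A =====
-- Hand port of Python's list.sort() for Int lists: a stable bottom-up merge sort, written
-- tail-recursively so it is stack-safe in the interpreter (PySem.List.sorted is an
-- insertion sort and cannot be evaluated on large lists). Exact for Int elements: any
-- ascending sort of Ints produces the same list (proved below via List.Perm.eq_of_pairwise).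
def pvMerge : List Int → List Int → List Int → List Int
  | xs, [], acc => List.reverseAux acc xs
  | [], y::ys, acc => List.reverseAux acc (y::ys)
  | x::xs, y::ys, acc =>
      if y < x then pvMerge (x::xs) ys (y::acc)
      else pvMerge xs (y::ys) (x::acc)
  termination_by xs ys _ => xs.length + ys.length

def pvMergePairs : List (List Int) → List (List Int) → List (List Int)
  | a :: b :: rest, acc => pvMergePairs rest (pvMerge a b [] :: acc)
  | [a], acc => (a :: acc).reverse
  | [], acc => acc.reverse

lemma pvMergePairs_count (ls acc : List (List Int)) :
    (pvMergePairs ls acc).length = (ls.length+1)/2 + acc.length := by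
  fun_induction pvMergePairs <;> simp_all <;> omega

def pvMergeAll : List (List Int) → List Int
  | [] => []
  | [a] => a
  | a :: b :: rest => pvMergeAll (pvMergePairs (a :: b :: rest) [])
  termination_by ls => ls.length
  decreasing_by simp [pvMergePairs_count]; omega

-- ascending sort, = Python's count.sort() on an Int list
def pvSortAsc (xs : List Int) : List Int := pvMergeAll (xs.map (fun x => [x]))

-- count[code] += 1  (Python list indexing/assignment)
def pvInc (cnt : List Int) (code : Int) : List Int :=
  PySem.List.pySetD cnt code (PySem.List.pyGetD cnt code 0 + 1)

-- one iteration of 'for _ in range(maxOnes): ans += count.pop()'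
def pvPop (st : List Int × Int) : List Int × Int :=
  match PySem.List.pop? st.1 with
  | some (x, rest) => (rest, st.2 + x)
  | none => st

def maximumNumberOfOnes (C : Int) (R : Int) (K : Int) (maxOnes : Int) : Int :=
  let count : List Int := List.replicate (K*K).toNat 0
  let count := (PySem.List.pyRange 0 R).foldl
    (fun cnt r => (PySem.List.pyRange 0 C).foldl
      (fun cnt c => pvInc cnt (PySem.Int.mod r K * K + PySem.Int.mod c K)) cnt) count
  -- count.sort()
  let count := pvSortAsc count
  ((PySem.List.pyRange 0 maxOnes).foldl (fun st _ => pvPop st) (count, (0:Int))).2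

-- ===== PORT B =====
def maximumNumberOfOnes_alt (C : Int) (R : Int) (K : Int) (maxOnes : Int) : Int :=
  let R0 := max R 0
  let C0 := max C 0
  -- qr, rr = divmod(R0, K); qc, rc = divmod(C0, K)  (none = ZeroDivisionError, outside Pre_)
  match PySem.Int.divmod? R0 K, PySem.Int.divmod? C0 K with
  | some (qr, rr), some (qc, rc) =>
    let groups : List (Int × Int) :=
      [((qr + 1) * (qc + 1), rr * rc),
       ((qr + 1) * qc,       rr * (K - rc)),
       (qr * (qc + 1),       (K - rr) * rc),
       (qr * qc,             (K - rr) * (K - rc))]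
    -- groups.sort(key=lambda g: g[0], reverse=True)
    let groups := PySem.List.sorted groups (fun g => g.1) true
    -- greedy loop over (val, cnt)
    (groups.foldl
      (fun st g => let t := min st.2 g.2; (st.1 + t * g.1, st.2 - t))
      ((0:Int), maxOnes)).1
  | _, _ => 0

-- ===== PRECONDITION & SPEC =====
-- Pre_ keeps the natural domain K ≥ 1 and 0 ≤ maxOnes ≤ K*K: A raises IndexError when
-- maxOnes > K*K (pop from an exhausted list); for K = 0 A raises ZeroDivisionError on a
-- non-empty grid (and B always raises there); for K < 0 A's value hinges on
-- negative-index wraparound of 'count[code]' and for maxOnes < 0 'range(maxOnes)' is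
-- silently empty — corners outside the task's natural domain.
def Pre_maximumNumberOfOnes (C : Int) (R : Int) (K : Int) (maxOnes : Int) : Prop :=
  1 ≤ K ∧ 0 ≤ maxOnes ∧ maxOnes ≤ K*K
instance (C : Int) (R : Int) (K : Int) (maxOnes : Int) : Decidable (Pre_maximumNumberOfOnes C R K maxOnes) := by unfold Pre_maximumNumberOfOnes; infer_instance

def pvWitness_maximumNumberOfOnes : Int × Int × Int × Int := (3, 4, 2, 2)

def Spec_maximumNumberOfOnes (C : Int) (R : Int) (K : Int) (maxOnes : Int) (out : Int) : Prop := out = maximumNumberOfOnes_alt C R K maxOnes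
instance (C : Int) (R : Int) (K : Int) (maxOnes : Int) (out : Int) : Decidable (Spec_maximumNumberOfOnes C R K maxOnes out) := by unfold Spec_maximumNumberOfOnes; infer_instance

-- ===== CLAIM (what is proved, stated in full; the proofs are below) =====
def Claim_equal_maximumNumberOfOnes : Prop := ∀ (C : Int) (R : Int) (K : Int) (maxOnes : Int), Dom_maximumNumberOfOnes C R K maxOnes → Pre_maximumNumberOfOnes C R K maxOnes → Spec_maximumNumberOfOnes C R K maxOnes (maximumNumberOfOnes C R K maxOnes)

-- ===== LEMMAS AND PROOFS =====

-- the ceiling count max(0, ceil((N - i)/K)) obeys the step rule of residue counting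
lemma pvResCnt_step (K i m : Int) (hK : 0 < K) (hi0 : 0 ≤ i) (hiK : i < K) (hm : 0 ≤ m) :
    max 0 (-(PySem.Int.floordiv (i - (m+1)) K))
      = max 0 (-(PySem.Int.floordiv (i - m) K)) + (if PySem.Int.mod m K = i then 1 else 0) := by
  have h1 : -PySem.Int.floordiv (-(m - i)) K = -PySem.Int.floordiv (i - m) K := by
    rw [show -(m - i) = i - m by ring]
  have hb := (PySem.Int.neg_floordiv_neg_eq_iff_of_pos hK).mp h1
  set q : Int := -PySem.Int.floordiv (i - m) K with hqdef
  have hq0 : 0 ≤ q := by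
    by_contra h
    rw [not_le] at h
    have hq1 : q ≤ -1 := by omega
    have : q * K ≤ (-1) * K := mul_le_mul_of_nonneg_right hq1 (le_of_lt hK)
    linarith [hb.2]
  have hmod : PySem.Int.mod m K = m % K := PySem.Int.mod_eq_emod_of_pos hK
  by_cases hdvd : m - i = q * K
  · -- r = m hits residue i
    have hmodeq : PySem.Int.mod m K = i := by
      rw [hmod, show m = i + K * q by linarith [hdvd], Int.add_mul_emod_self_left,
        Int.emod_eq_of_lt hi0 hiK]
    have h3 : -PySem.Int.floordiv (-((m+1) - i)) K = q + 1 := by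
      rw [PySem.Int.neg_floordiv_neg_eq_iff_of_pos hK]
      constructor
      · nlinarith
      · nlinarith
    rw [show i - (m+1) = -((m+1) - i) by ring, h3, hmodeq]
    simp
    omega
  · have hne : ¬ (PySem.Int.mod m K = i) := by
      intro he
      rw [hmod] at he
      have hz : (m - i) % K = 0 := by
        rw [Int.sub_emod, he, Int.emod_eq_of_lt hi0 hiK]
        simp
      obtain ⟨d, hd⟩ := Int.dvd_of_emod_eq_zero hz
      have hle : d ≤ q := le_of_mul_le_mul_right (by nlinarith [hb.2]) hK
      have hgt : q - 1 < d := lt_of_mul_lt_mul_right (by nlinarith [hb.1]) (le_of_lt hK)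
      have : d = q := by omega
      rw [this] at hd
      exact hdvd (by linarith)
    have h3 : -PySem.Int.floordiv (-((m+1) - i)) K = q := by
      rw [PySem.Int.neg_floordiv_neg_eq_iff_of_pos hK]
      have hlt : m - i < q * K := lt_of_le_of_ne hb.2 (by exact hdvd)
      exact ⟨by linarith [hb.1], by omega⟩
    rw [show i - (m+1) = -((m+1) - i) by ring, h3, if_neg hne]
    omega

-- closed form for the number of r in range(N) with r % K == i
lemma pvRowCount (K i : Int) (hK : 0 < K) (hi0 : 0 ≤ i) (hiK : i < K) (N : Int) :
    (((PySem.List.pyRange 0 N).countP (fun r => PySem.Int.mod r K == i) : Nat) : Int)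
      = max 0 (-(PySem.Int.floordiv (i - N) K)) := by
  have hzero : ∀ M : Int, M ≤ 0 →
      (((PySem.List.pyRange 0 M).countP (fun r => PySem.Int.mod r K == i) : Nat) : Int)
        = max 0 (-(PySem.Int.floordiv (i - M) K)) := by
    intro M hM
    rw [PySem.List.pyRange_one_eq_nil hM]
    have hnn : 0 ≤ PySem.Int.floordiv (i - M) K := by
      rw [PySem.Int.floordiv_eq_ediv_of_pos hK]
      exact Int.ediv_nonneg (by omega) (le_of_lt hK)
    simp
    omega
  rcases (by omega : N ≤ 0 ∨ 0 < N) with hN | hN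
  · exact hzero N hN
  · have hNn : N = ((N.toNat : Nat) : Int) := (Int.toNat_of_nonneg (le_of_lt hN)).symm
    rw [hNn]
    generalize N.toNat = n
    induction n with
    | zero => exact hzero 0 (le_refl 0)
    | succ n ih =>
      rw [show (((n+1 : Nat)) : Int) = ((n : Nat) : Int) + 1 by push_cast; ring,
        PySem.List.pyRange_one_succ_right (by positivity), List.countP_append]
      have hstep := pvResCnt_step K i ((n : Nat) : Int) hK hi0 hiK (by positivity)
      rw [hstep, ← ih]
      by_cases hc : PySem.Int.mod ((n : Nat) : Int) K = i
      · simp [hc]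
      · simp [hc]

-- the nested loop is the fold of pvInc over the flattened list of codes
lemma pvFoldFlat (l1 l2 : List Int) (f : Int → Int → Int) (init : List Int) :
    l1.foldl (fun cnt r => l2.foldl (fun cnt c => pvInc cnt (f r c)) cnt) init
      = (l1.flatMap (fun r => l2.map (f r))).foldl pvInc init := by
  induction l1 generalizing init with
  | nil => rfl
  | cons a t ih => simp [List.flatMap_cons, List.foldl_append, List.foldl_map, ih]

-- folding pvInc over in-range codes tallies occurrences
lemma pvIncFold (n : Nat) (L : List Int) (hL : ∀ e ∈ L, 0 ≤ e ∧ e < (n : Int)) (f : Nat → Int) :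
    L.foldl pvInc ((List.range n).map f)
      = (List.range n).map (fun e => f e + (L.count ((e : Nat) : Int) : Int)) := by
  induction L generalizing f with
  | nil => simp
  | cons a t ih =>
    obtain ⟨ha0, han⟩ := hL a (by simp)
    have hlen : a.toNat < n := by omega
    have hstep : pvInc ((List.range n).map f) a
        = (List.range n).map (fun e => if e = a.toNat then f e + 1 else f e) := by
      unfold pvInc
      rw [PySem.List.pySetD_of_nonneg _ _ ha0,
        PySem.List.pyGetD_eq_getElem _ _ ha0 (by simpa using han)]
      apply List.ext_getElem
      · simp
      · intro j h1 h2
        simp only [List.getElem_set, List.getElem_map, List.getElem_range]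
        rcases eq_or_ne j a.toNat with he | he
        · simp [he]
        · simp [he, Ne.symm he]
    rw [List.foldl_cons, hstep, ih (fun e he => hL e (by simp [he]))]
    apply List.map_congr_left
    intro e he
    have ha' : ((a.toNat : Nat) : Int) = a := Int.toNat_of_nonneg ha0
    by_cases hc : e = a.toNat
    · subst hc
      have hbeq : (a == ((a.toNat : Nat) : Int)) = true := by rw [ha']; simp
      rw [List.count_cons, hbeq]
      simp
      ring
    · have hbeq : (a == ((e : Nat) : Int)) = false :=
        beq_eq_false_iff_ne.mpr (by intro h; exact hc (by omega))
      rw [List.count_cons, hbeq]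
      simp [hc]

-- a code a*K+b with 0 ≤ a,b < K determines a and b
lemma pvCodeInj (K a b a' b' : Int) (hK : 0 < K) (ha : 0 ≤ a ∧ a < K) (hb : 0 ≤ b ∧ b < K)
    (ha' : 0 ≤ a' ∧ a' < K) (hb' : 0 ≤ b' ∧ b' < K) (h : a*K + b = a'*K + b') :
    a = a' ∧ b = b' := by
  have h1 : (a - a') * K = b' - b := by ring_nf; linarith
  have h2 : a = a' := by nlinarith
  exact ⟨h2, by nlinarith⟩

-- count of one code in the flattened code list = product of residue counts
lemma pvCountFlat (l1 l2 : List Int) (K i j : Int) (hK : 0 < K)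
    (hi : 0 ≤ i ∧ i < K) (hj : 0 ≤ j ∧ j < K) :
    ((l1.flatMap (fun r => l2.map (fun c => PySem.Int.mod r K * K + PySem.Int.mod c K))).count (i*K + j))
      = l1.countP (fun r => PySem.Int.mod r K == i) * l2.countP (fun c => PySem.Int.mod c K == j) := by
  induction l1 with
  | nil => simp
  | cons a t ih =>
    rw [List.flatMap_cons, List.count_append, ih, List.countP_cons]
    have hma : 0 ≤ PySem.Int.mod a K ∧ PySem.Int.mod a K < K :=
      ⟨PySem.Int.mod_nonneg a hK, PySem.Int.mod_lt a hK⟩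
    have hrow : (List.map (fun c => PySem.Int.mod a K * K + PySem.Int.mod c K) l2).count (i*K + j)
        = if PySem.Int.mod a K == i then l2.countP (fun c => PySem.Int.mod c K == j) else 0 := by
      rw [List.count_eq_countP, List.countP_map]
      by_cases hc : PySem.Int.mod a K = i
      · rw [if_pos (by simp [hc])]
        apply List.countP_congr
        intro c _
        have hmc : 0 ≤ PySem.Int.mod c K ∧ PySem.Int.mod c K < K :=
          ⟨PySem.Int.mod_nonneg c hK, PySem.Int.mod_lt c hK⟩
        simp only [Function.comp, beq_iff_eq, hc]
        constructor
        · intro h; omega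
        · intro h; omega
      · rw [if_neg (by simp [hc])]
        rw [List.countP_eq_zero]
        intro c _
        simp only [Function.comp, beq_iff_eq]
        intro heq
        have hmc : 0 ≤ PySem.Int.mod c K ∧ PySem.Int.mod c K < K :=
          ⟨PySem.Int.mod_nonneg c hK, PySem.Int.mod_lt c hK⟩
        exact hc (pvCodeInj K _ _ i j hK hma hmc hi hj heq).1
    rw [hrow]
    by_cases hc : PySem.Int.mod a K = i
    · simp [hc]
      ring
    · simp [hc]

-- reindexing: a map over range (a*b) by (e/b, e%b) is the nested flatMap
lemma pvRangeMulFlat {α : Type} (a b : Nat) (h : Nat → Nat → α) :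
    (List.range (a*b)).map (fun e => h (e/b) (e%b))
      = (List.range a).flatMap (fun i => (List.range b).map (fun j => h i j)) := by
  induction a with
  | zero => simp
  | succ a ih =>
    rw [List.range_succ, List.flatMap_append, ← ih,
      show (a+1)*b = a*b + b by ring, List.range_add, List.map_append, List.map_map]
    congr 1
    · simp only [List.flatMap_cons, List.flatMap_nil, List.append_nil]
      apply List.map_congr_left
      intro j hj
      rw [List.mem_range] at hj
      have h1 : (a*b + j)/b = a := by
        rw [show a*b + j = b*a + j by ring, Nat.mul_add_div (by omega), Nat.div_eq_of_lt hj]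
        omega
      have h2 : (a*b + j) % b = j := by
        rw [show a*b + j = b*a + j by ring, Nat.mul_add_mod, Nat.mod_eq_of_lt hj]
      simp [Function.comp, h1, h2]

-- the pop loop sums the last idxs.length elements, largest first
lemma pvPopLoop (idxs : List Int) : ∀ (l : List Int) (acc : Int), idxs.length ≤ l.length →
    (idxs.foldl (fun st _ => pvPop st) (l, acc)).2 = acc + (l.reverse.take idxs.length).sum := by
  induction idxs with
  | nil => intro l acc _; simp
  | cons a t ih =>
    intro l acc h
    have hne : l ≠ [] := by
      intro e; subst e; simp at h
    obtain ⟨ys, y, hy⟩ := List.eq_nil_or_concat l |>.resolve_left hne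
    rw [List.concat_eq_append] at hy
    subst hy
    rw [List.foldl_cons, show pvPop (ys ++ [y], acc) = (ys, acc + y) by
      simp [pvPop, PySem.List.pop?_last]]
    rw [ih ys (acc + y) (by simp at h ⊢; omega)]
    rw [List.reverse_append]
    simp [List.take_succ_cons]
    ring

-- ===== B-side lemmas =====

-- the expansion of a (value, count) group list into the multiset of class counts
def pvExpand (G : List (Int × Int)) : List Int :=
  (G.map (fun g => List.replicate g.2.toNat g.1)).flatten

-- B's greedy fold sums the first maxOnes entries of the expanded (descending) list
lemma pvGreedy (G : List (Int × Int)) (hc : ∀ g ∈ G, 0 ≤ g.2) :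
    ∀ (m ans : Int), 0 ≤ m → m ≤ ((pvExpand G).length : Int) →
    (G.foldl (fun st g => let t := min st.2 g.2; (st.1 + t * g.1, st.2 - t)) (ans, m)).1
      = ans + ((pvExpand G).take m.toNat).sum := by
  induction G with
  | nil => intro m ans _ _; simp [pvExpand]
  | cons g t ih =>
    intro m ans hm hlen
    have hg2 : 0 ≤ g.2 := hc g (List.mem_cons_self)
    have hexp : pvExpand (g :: t) = List.replicate g.2.toNat g.1 ++ pvExpand t := by
      simp [pvExpand]
    have hlc : m ≤ (g.2.toNat : Int) + ((pvExpand t).length : Int) := by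
      rw [hexp] at hlen
      simp only [List.length_append, List.length_replicate, Nat.cast_add] at hlen
      exact hlen
    have hred : (let t := min (ans, m).2 g.2; ((ans, m).1 + t * g.1, (ans, m).2 - t))
        = (ans + min m g.2 * g.1, m - min m g.2) := rfl
    rw [List.foldl_cons, hred, hexp,
      ih (fun x hx => hc x (List.mem_cons_of_mem g hx)) (m - min m g.2)
        (ans + min m g.2 * g.1) (by omega) (by omega)]
    rw [List.take_append, List.length_replicate, List.take_replicate, List.sum_append,
      List.sum_replicate, nsmul_eq_mul]
    have h1 : min m.toNat g.2.toNat = (min m g.2).toNat := by omega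
    have h2 : m.toNat - g.2.toNat = (m - min m g.2).toNat := by omega
    rw [h1, h2, Int.toNat_of_nonneg (by omega : (0:Int) ≤ min m g.2)]
    ring

-- expanding a value-descending group list gives a descending list
lemma pvExpand_pairwise (G : List (Int × Int)) (h : G.Pairwise (fun a b => b.1 ≤ a.1)) :
    (pvExpand G).Pairwise (fun a b => b ≤ a) := by
  unfold pvExpand
  rw [List.pairwise_flatten]
  constructor
  · intro l hl
    rw [List.mem_map] at hl
    obtain ⟨g, _, rfl⟩ := hl
    rw [List.pairwise_replicate]
    right; exact le_refl _
  · rw [List.pairwise_map]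
    refine h.imp ?_
    intro a b hab x hx y hy
    rw [List.eq_of_mem_replicate hx, List.eq_of_mem_replicate hy]
    exact hab

-- permutations expand to permutations
lemma pvExpand_perm (G G' : List (Int × Int)) (h : G.Perm G') : (pvExpand G).Perm (pvExpand G') :=
  List.Perm.flatten (h.map _)

-- flatMap of a constant two-block list, as a permutation of two replicate blocks
lemma pvConstFlat (n p q : Nat) (x y : Int) :
    ((List.range n).flatMap (fun _ => List.replicate p x ++ List.replicate q y)).Perm
      (List.replicate (n*p) x ++ List.replicate (n*q) y) := by
  induction n with
  | zero => simp
  | succ n ih =>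
    rw [List.range_succ, List.flatMap_append]
    simp only [List.flatMap_cons, List.flatMap_nil, List.append_nil]
    refine (ih.append_right _).trans ?_
    have e1 : ((List.replicate (n*p) x ++ List.replicate (n*q) y)
          ++ (List.replicate p x ++ List.replicate q y)).Perm
        (List.replicate (n*p) x ++ (List.replicate p x
          ++ (List.replicate (n*q) y ++ List.replicate q y))) := by
      rw [List.append_assoc]
      exact List.Perm.append_left _ (List.perm_append_comm_assoc _ _ _)
    have e2 : List.replicate (n*p) x ++ (List.replicate p x
          ++ (List.replicate (n*q) y ++ List.replicate q y))
        = List.replicate ((n+1)*p) x ++ List.replicate ((n+1)*q) y := by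
      rw [← List.append_assoc, ← List.replicate_add, ← List.replicate_add,
        show n*p + p = (n+1)*p by ring, show n*q + q = (n+1)*q by ring]
    rw [← e2]
    exact e1

-- a threshold map over range k is two replicate blocks
lemma pvInnerSplit (k rc : Nat) (hrc : rc ≤ k) (x y : Int) :
    (List.range k).map (fun j => if j < rc then x else y)
      = List.replicate rc x ++ List.replicate (k - rc) y := by
  conv_lhs => rw [show k = rc + (k - rc) by omega]
  rw [List.range_add, List.map_append, List.map_map]
  congr 1
  · rw [show List.replicate rc x = (List.range rc).map (fun _ => x) by
      rw [List.map_const', List.length_range]]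
    apply List.map_congr_left
    intro j hj
    rw [List.mem_range] at hj
    simp [hj]
  · rw [show List.replicate (k - rc) y = (List.range (k - rc)).map (fun _ => y) by
      rw [List.map_const', List.length_range]]
    apply List.map_congr_left
    intro j _
    simp [Function.comp]

-- the full K*K grid of threshold products, as a permutation of the four groups' expansion
lemma pvBlockPerm (k rr rc : Nat) (hrr : rr ≤ k) (hrc : rc ≤ k) (a b c d : Int) :
    ((List.range (k*k)).map (fun e =>
        if e / k < rr then (if e % k < rc then a else b)
        else (if e % k < rc then c else d))).Perm
      (List.replicate (rr*rc) a ++ (List.replicate (rr*(k-rc)) b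
        ++ (List.replicate ((k-rr)*rc) c ++ List.replicate ((k-rr)*(k-rc)) d))) := by
  rw [pvRangeMulFlat k k (fun i j =>
      if i < rr then (if j < rc then a else b) else (if j < rc then c else d))]
  have hin : ∀ i ∈ List.range k,
      (List.range k).map (fun j =>
        if i < rr then (if j < rc then a else b) else (if j < rc then c else d))
      = if i < rr then (List.replicate rc a ++ List.replicate (k-rc) b)
        else (List.replicate rc c ++ List.replicate (k-rc) d) := by
    intro i _
    by_cases h : i < rr
    · simp only [h, if_true]
      exact pvInnerSplit k rc hrc a b
    · simp only [h, if_false]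
      exact pvInnerSplit k rc hrc c d
  rw [List.flatMap_congr hin,
    show List.range k = List.range rr ++ (List.range (k-rr)).map (rr + ·) by
      rw [← List.range_add]; congr 1; omega,
    List.flatMap_append, List.flatMap_map]
  have h1 : (List.range rr).flatMap (fun i =>
      if i < rr then (List.replicate rc a ++ List.replicate (k-rc) b)
      else (List.replicate rc c ++ List.replicate (k-rc) d))
      = (List.range rr).flatMap (fun _ => List.replicate rc a ++ List.replicate (k-rc) b) := by
    apply List.flatMap_congr
    intro i hi
    rw [List.mem_range] at hi
    simp [hi]
  have h2 : (List.range (k-rr)).flatMap (fun i =>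
      if rr + i < rr then (List.replicate rc a ++ List.replicate (k-rc) b)
      else (List.replicate rc c ++ List.replicate (k-rc) d))
      = (List.range (k-rr)).flatMap (fun _ => List.replicate rc c ++ List.replicate (k-rc) d) := by
    apply List.flatMap_congr
    intro i _
    have h : ¬ (rr + i < rr) := by omega
    simp [h]
  rw [h1, h2]
  refine ((pvConstFlat rr rc (k-rc) a b).append (pvConstFlat (k-rr) rc (k-rc) c d)).trans ?_
  rw [List.append_assoc]

-- closed form for the residue count: ceil((R - i)/K) clamped at 0, via divmod(max(R,0), K)
lemma pvClosed (K R i : Int) (hK : 0 < K) (hi0 : 0 ≤ i) (hiK : i < K) :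
    max 0 (-(PySem.Int.floordiv (i - R) K))
      = (if i < PySem.Int.mod (max R 0) K
          then PySem.Int.floordiv (max R 0) K + 1 else PySem.Int.floordiv (max R 0) K) := by
  rcases (by omega : R ≤ 0 ∨ 0 < R) with hR | hR
  · have hmax : max R 0 = 0 := by omega
    have hnn : 0 ≤ PySem.Int.floordiv (i - R) K := by
      rw [PySem.Int.floordiv_eq_ediv_of_pos hK]
      exact Int.ediv_nonneg (by omega) (le_of_lt hK)
    rw [hmax]
    have h0 : PySem.Int.mod 0 K = 0 := by
      rw [PySem.Int.mod_eq_emod_of_pos hK]; simp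
    have h1 : PySem.Int.floordiv 0 K = 0 := by
      rw [PySem.Int.floordiv_eq_ediv_of_pos hK]; simp
    rw [h0, h1, if_neg (by omega)]
    omega
  · have hmax : max R 0 = R := by omega
    rw [hmax]
    set q := PySem.Int.floordiv R K with hq
    set r := PySem.Int.mod R K with hr
    have hqr : q * K + r = R := PySem.Int.floordiv_mul_add_mod R K
    have hr0 : 0 ≤ r := PySem.Int.mod_nonneg R hK
    have hrK : r < K := PySem.Int.mod_lt R hK
    have hq0 : 0 ≤ q := by nlinarith
    set t : Int := if i < r then q + 1 else q with ht
    have heq : -(PySem.Int.floordiv (-(R - i)) K) = t := by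
      rw [PySem.Int.neg_floordiv_neg_eq_iff_of_pos hK]
      by_cases hc : i < r
      · rw [ht, if_pos hc]
        constructor
        · nlinarith
        · nlinarith
      · rw [ht, if_neg hc]
        constructor
        · nlinarith
        · nlinarith
    rw [show i - R = -(R - i) by ring, heq]
    have ht0 : 0 ≤ t := by rw [ht]; split_ifs <;> omega
    omega

-- merge-sort correctness (A's hand-ported list.sort())
lemma pvMerge_count (xs ys acc : List Int) (v : Int) :
    (pvMerge xs ys acc).count v = xs.count v + ys.count v + acc.count v := by
  fun_induction pvMerge <;>
    simp_all [List.reverseAux_eq, List.count_append, List.count_reverse, List.count_cons] <;>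
    omega

lemma pvMerge_pairwise (xs ys acc : List Int) (hx : xs.Pairwise (· ≤ ·))
    (hy : ys.Pairwise (· ≤ ·)) (hacc : acc.Pairwise (fun a b => b ≤ a))
    (haxs : ∀ a ∈ acc, ∀ b ∈ xs, a ≤ b) (hays : ∀ a ∈ acc, ∀ b ∈ ys, a ≤ b) :
    (pvMerge xs ys acc).Pairwise (· ≤ ·) := by
  fun_induction pvMerge with
  | case1 xs acc =>
    rw [List.reverseAux_eq, List.pairwise_append, List.pairwise_reverse]
    exact ⟨hacc, hx, fun a ha b hb => haxs a (List.mem_reverse.mp ha) b hb⟩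
  | case2 y ys acc =>
    rw [List.reverseAux_eq, List.pairwise_append, List.pairwise_reverse]
    exact ⟨hacc, hy, fun a ha b hb => hays a (List.mem_reverse.mp ha) b hb⟩
  | case3 x xs y ys acc hlt ih =>
    apply ih hx (hy.sublist (List.sublist_cons_self y ys))
    · rw [List.pairwise_cons]
      exact ⟨fun a ha => hays a ha y List.mem_cons_self, hacc⟩
    · intro a ha b hb
      rcases List.mem_cons.mp ha with rfl | ha'
      · rcases List.mem_cons.mp hb with rfl | hb'
        · omega
        · have := List.rel_of_pairwise_cons hx hb'
          omega
      · exact haxs a ha' b hb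
    · intro a ha b hb
      rcases List.mem_cons.mp ha with rfl | ha'
      · exact List.rel_of_pairwise_cons hy hb
      · exact hays a ha' b (List.mem_cons_of_mem y hb)
  | case4 x xs y ys acc hlt ih =>
    apply ih (hx.sublist (List.sublist_cons_self x xs)) hy
    · rw [List.pairwise_cons]
      exact ⟨fun a ha => haxs a ha x List.mem_cons_self, hacc⟩
    · intro a ha b hb
      rcases List.mem_cons.mp ha with rfl | ha'
      · exact List.rel_of_pairwise_cons hx hb
      · exact haxs a ha' b (List.mem_cons_of_mem x hb)
    · intro a ha b hb
      rcases List.mem_cons.mp ha with rfl | ha'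
      · rcases List.mem_cons.mp hb with rfl | hb'
        · omega
        · have := List.rel_of_pairwise_cons hy hb'
          omega
      · exact hays a ha' b hb

lemma pvMergePairs_sortedAll (ls acc : List (List Int))
    (hls : ∀ l ∈ ls, l.Pairwise (· ≤ ·)) (hacc : ∀ l ∈ acc, l.Pairwise (· ≤ ·)) :
    ∀ l ∈ pvMergePairs ls acc, l.Pairwise (· ≤ ·) := by
  fun_induction pvMergePairs with
  | case1 a b rest acc ih =>
    apply ih (fun l hl => hls l (by simp [hl]))
    intro l hl
    rcases List.mem_cons.mp hl with rfl | hl'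
    · exact pvMerge_pairwise a b [] (hls a (by simp)) (hls b (by simp))
        (by simp) (by simp) (by simp)
    · exact hacc l hl'
  | case2 a acc =>
    intro l hl
    rw [List.mem_reverse] at hl
    rcases List.mem_cons.mp hl with rfl | hl'
    · exact hls l (by simp)
    · exact hacc l hl'
  | case3 acc =>
    intro l hl
    exact hacc l (List.mem_reverse.mp hl)

lemma pvMergePairs_flatten_count (ls acc : List (List Int)) (v : Int) :
    (pvMergePairs ls acc).flatten.count v = ls.flatten.count v + acc.flatten.count v := by
  fun_induction pvMergePairs with
  | case1 a b rest acc ih =>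
    rw [ih]
    simp [List.count_flatten, pvMerge_count]
    omega
  | case2 a acc =>
    rw [List.count_flatten, List.map_reverse, List.sum_reverse, ← List.count_flatten]
    simp [List.count_append]
  | case3 acc =>
    rw [List.count_flatten, List.map_reverse, List.sum_reverse, ← List.count_flatten]
    simp

lemma pvMergeAll_count (ls : List (List Int)) (v : Int) :
    (pvMergeAll ls).count v = ls.flatten.count v := by
  fun_induction pvMergeAll with
  | case1 => rfl
  | case2 a => simp
  | case3 a b rest ih =>
    rw [ih, pvMergePairs_flatten_count]
    simp

lemma pvMergeAll_pairwise (ls : List (List Int)) (hls : ∀ l ∈ ls, l.Pairwise (· ≤ ·)) :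
    (pvMergeAll ls).Pairwise (· ≤ ·) := by
  fun_induction pvMergeAll with
  | case1 => simp
  | case2 a => exact hls a (by simp)
  | case3 a b rest ih =>
    exact ih (pvMergePairs_sortedAll _ [] hls (by simp))

lemma pvFlattenSingletons (xs : List Int) : (xs.map (fun x => [x])).flatten = xs := by
  induction xs with
  | nil => rfl
  | cons a t ih => simp [ih]

lemma pvSortAsc_perm (xs : List Int) : (pvSortAsc xs).Perm xs := by
  rw [List.perm_iff_count]
  intro v
  rw [pvSortAsc, pvMergeAll_count, pvFlattenSingletons]

lemma pvSortAsc_pairwise (xs : List Int) : (pvSortAsc xs).Pairwise (· ≤ ·) := by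
  apply pvMergeAll_pairwise
  intro l hl
  rw [List.mem_map] at hl
  obtain ⟨x, _, rfl⟩ := hl
  simp

set_option maxHeartbeats 1000000 in
theorem maximumNumberOfOnes_spec : Claim_equal_maximumNumberOfOnes := by
  intro C R K m _ hpre
  obtain ⟨hK1, hm0, hmK⟩ := hpre
  have hK : 0 < K := hK1
  set k := K.toNat with hk
  have hKk : ((k : Nat) : Int) = K := Int.toNat_of_nonneg (by omega)
  have hKK : K*K = ((k*k : Nat) : Int) := by push_cast; rw [hKk]
  have hkk : (K*K).toNat = k*k := by rw [hKK, Int.toNat_natCast]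
  have hkpos : 0 < k := by omega
  have hKne : K ≠ 0 := by omega
  -- B's divmod values
  set qr := PySem.Int.floordiv (max R 0) K with hqr
  set rr := PySem.Int.mod (max R 0) K with hrr
  set qc := PySem.Int.floordiv (max C 0) K with hqc
  set rc := PySem.Int.mod (max C 0) K with hrc
  have hdvR : PySem.Int.divmod? (max R 0) K = some (qr, rr) := by
    simp only [PySem.Int.divmod?, if_neg hKne, hqr, hrr, PySem.Int.floordiv, PySem.Int.mod]
  have hdvC : PySem.Int.divmod? (max C 0) K = some (qc, rc) := by
    simp only [PySem.Int.divmod?, if_neg hKne, hqc, hrc, PySem.Int.floordiv, PySem.Int.mod]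
  have hrr0 : 0 ≤ rr := PySem.Int.mod_nonneg _ hK
  have hrrK : rr < K := PySem.Int.mod_lt _ hK
  have hrc0 : 0 ≤ rc := PySem.Int.mod_nonneg _ hK
  have hrcK : rc < K := PySem.Int.mod_lt _ hK
  -- abbreviations for A's residue-class counts
  set fI : Int → Int := fun i => max 0 (-(PySem.Int.floordiv (i - R) K)) with hfI
  set fJ : Int → Int := fun j => max 0 (-(PySem.Int.floordiv (j - C) K)) with hfJ
  set S : List Int := (PySem.List.pyRange 0 R).flatMap
      (fun r => (PySem.List.pyRange 0 C).map
        (fun c => PySem.Int.mod r K * K + PySem.Int.mod c K)) with hSdef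
  -- the tallied list after A's double loop
  have hSb : ∀ e ∈ S, 0 ≤ e ∧ e < ((k*k : Nat) : Int) := by
    intro e he
    rw [hSdef] at he
    simp only [List.mem_flatMap, List.mem_map] at he
    obtain ⟨r, _, c, _, rfl⟩ := he
    have h1 := PySem.Int.mod_nonneg r hK
    have h2 := PySem.Int.mod_lt r hK
    have h3 := PySem.Int.mod_nonneg c hK
    have h4 := PySem.Int.mod_lt c hK
    rw [← hKK]
    constructor
    · positivity
    · nlinarith
  have hloop : (PySem.List.pyRange 0 R).foldl
      (fun cnt r => (PySem.List.pyRange 0 C).foldl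
        (fun cnt c => pvInc cnt (PySem.Int.mod r K * K + PySem.Int.mod c K)) cnt)
      (List.replicate (K*K).toNat (0:Int))
      = (List.range (k*k)).map (fun e => ((S.count ((e : Nat) : Int)) : Int)) := by
    have hbase : List.replicate (K*K).toNat (0:Int) = (List.range (k*k)).map (fun _ => (0:Int)) := by
      rw [hkk]
      simp [List.map_const']
    rw [hbase, pvFoldFlat, ← hSdef, pvIncFold (k*k) S hSb]
    simp
  -- each tally is the product of the two residue counts
  have hentry : ∀ e ∈ List.range (k*k),
      ((S.count ((e : Nat) : Int)) : Int) = fI (((e/k : Nat)) : Int) * fJ (((e%k : Nat)) : Int) := by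
    intro e he
    rw [List.mem_range] at he
    have hdiv : e/k < k := Nat.div_lt_iff_lt_mul hkpos |>.mpr (by omega)
    have hmod : e%k < k := Nat.mod_lt e hkpos
    have hcode : ((e : Nat) : Int) = ((e/k : Nat) : Int) * K + ((e%k : Nat) : Int) := by
      have h0 : ((e : Nat) : Int) = ((k*(e/k) + e%k : Nat) : Int) := by rw [Nat.div_add_mod]
      rw [h0, Nat.cast_add, Nat.cast_mul, hKk]
      ring
    have hi0 : (0:Int) ≤ ((e/k : Nat) : Int) := by exact_mod_cast Nat.zero_le _
    have hiK : ((e/k : Nat) : Int) < K := by rw [← hKk]; exact_mod_cast hdiv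
    have hj0 : (0:Int) ≤ ((e%k : Nat) : Int) := by exact_mod_cast Nat.zero_le _
    have hjK : ((e%k : Nat) : Int) < K := by rw [← hKk]; exact_mod_cast hmod
    rw [hcode, hSdef,
      pvCountFlat (PySem.List.pyRange 0 R) (PySem.List.pyRange 0 C) K _ _ hK ⟨hi0, hiK⟩ ⟨hj0, hjK⟩,
      Nat.cast_mul, pvRowCount K _ hK hi0 hiK R, pvRowCount K _ hK hj0 hjK C]
  -- the tallied list, in closed threshold form
  have hclosed : ∀ e ∈ List.range (k*k),
      fI (((e/k : Nat)) : Int) * fJ (((e%k : Nat)) : Int)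
        = (if e / k < rr.toNat then (if e % k < rc.toNat then (qr+1)*(qc+1) else (qr+1)*qc)
           else (if e % k < rc.toNat then qr*(qc+1) else qr*qc)) := by
    intro e he
    rw [List.mem_range] at he
    have hdiv : e/k < k := Nat.div_lt_iff_lt_mul hkpos |>.mpr (by omega)
    have hmod : e%k < k := Nat.mod_lt e hkpos
    have hi0 : (0:Int) ≤ ((e/k : Nat) : Int) := by exact_mod_cast Nat.zero_le _
    have hiK : ((e/k : Nat) : Int) < K := by rw [← hKk]; exact_mod_cast hdiv
    have hj0 : (0:Int) ≤ ((e%k : Nat) : Int) := by exact_mod_cast Nat.zero_le _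
    have hjK : ((e%k : Nat) : Int) < K := by rw [← hKk]; exact_mod_cast hmod
    rw [hfI, hfJ]
    simp only []
    rw [pvClosed K R _ hK hi0 hiK, pvClosed K C _ hK hj0 hjK, ← hqr, ← hrr, ← hqc, ← hrc]
    have hci : (((e/k : Nat) : Int) < rr) ↔ e/k < rr.toNat := by omega
    have hcj : (((e%k : Nat) : Int) < rc) ↔ e%k < rc.toNat := by omega
    by_cases h1 : e/k < rr.toNat <;> by_cases h2 : e%k < rc.toNat
    · rw [if_pos (hci.mpr h1), if_pos (hcj.mpr h2), if_pos h1, if_pos h2]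
    · rw [if_pos (hci.mpr h1), if_neg (fun h => h2 (hcj.mp h)), if_pos h1, if_neg h2]
    · rw [if_neg (fun h => h1 (hci.mp h)), if_pos (hcj.mpr h2), if_neg h1, if_pos h2]
    · rw [if_neg (fun h => h1 (hci.mp h)), if_neg (fun h => h2 (hcj.mp h)), if_neg h1, if_neg h2]
  set L : List Int := (List.range (k*k)).map (fun e =>
      if e / k < rr.toNat then (if e % k < rc.toNat then (qr+1)*(qc+1) else (qr+1)*qc)
      else (if e % k < rc.toNat then qr*(qc+1) else qr*qc)) with hL
  have htally : (List.range (k*k)).map (fun e => ((S.count ((e : Nat) : Int)) : Int)) = L := by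
    rw [hL]
    apply List.map_congr_left
    intro e he
    rw [hentry e he, hclosed e he]
  -- B's groups and their expansion
  set groups0 : List (Int × Int) :=
    [((qr + 1) * (qc + 1), rr * rc),
     ((qr + 1) * qc,       rr * (K - rc)),
     (qr * (qc + 1),       (K - rr) * rc),
     (qr * qc,             (K - rr) * (K - rc))] with hg0
  have hrrk : rr.toNat ≤ k := by omega
  have hrck : rc.toNat ≤ k := by omega
  have hcr : rr = ((rr.toNat : Nat) : Int) := (Int.toNat_of_nonneg hrr0).symm
  have hcc : rc = ((rc.toNat : Nat) : Int) := (Int.toNat_of_nonneg hrc0).symm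
  have hcr' : K - rr = (((k - rr.toNat : Nat)) : Int) := by push_cast; omega
  have hcc' : K - rc = (((k - rc.toNat : Nat)) : Int) := by push_cast; omega
  have htn1 : (rr * rc).toNat = rr.toNat * rc.toNat := by
    conv_lhs => rw [hcr, hcc, ← Nat.cast_mul, Int.toNat_natCast]
  have htn2 : (rr * (K - rc)).toNat = rr.toNat * (k - rc.toNat) := by
    conv_lhs => rw [hcr, hcc', ← Nat.cast_mul, Int.toNat_natCast]
  have htn3 : ((K - rr) * rc).toNat = (k - rr.toNat) * rc.toNat := by
    conv_lhs => rw [hcr', hcc, ← Nat.cast_mul, Int.toNat_natCast]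
  have htn4 : ((K - rr) * (K - rc)).toNat = (k - rr.toNat) * (k - rc.toNat) := by
    conv_lhs => rw [hcr', hcc', ← Nat.cast_mul, Int.toNat_natCast]
  have hexp0 : pvExpand groups0
      = List.replicate (rr.toNat*rc.toNat) ((qr+1)*(qc+1))
        ++ (List.replicate (rr.toNat*(k-rc.toNat)) ((qr+1)*qc)
        ++ (List.replicate ((k-rr.toNat)*rc.toNat) (qr*(qc+1))
        ++ List.replicate ((k-rr.toNat)*(k-rc.toNat)) (qr*qc))) := by
    rw [hg0]
    simp [pvExpand, htn1, htn2, htn3, htn4]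
  have hperm0 : L.Perm (pvExpand groups0) := by
    rw [hexp0, hL]
    exact pvBlockPerm k rr.toNat rc.toNat hrrk hrck _ _ _ _
  set G' := PySem.List.sorted groups0 (fun g => g.1) true with hG'
  have hpermG : (pvExpand groups0).Perm (pvExpand G') :=
    (pvExpand_perm G' groups0 (PySem.List.sorted_perm groups0 (fun g => g.1) true)).symm
  -- A's sorted-descending list equals B's expanded sorted groups
  set Dsc := (pvSortAsc L).reverse with hDsc
  have hDperm : Dsc.Perm (pvExpand G') :=
    (((List.reverse_perm _).trans (pvSortAsc_perm L)).trans hperm0).trans hpermG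
  have hDpair : Dsc.Pairwise (fun a b => b ≤ a) := by
    rw [hDsc, List.pairwise_reverse]
    simpa using pvSortAsc_pairwise L
  have hGpair : (pvExpand G').Pairwise (fun a b => b ≤ a) :=
    pvExpand_pairwise G' (PySem.List.sorted_pairwise_rev groups0 (fun g => g.1))
  have hDeq : Dsc = pvExpand G' :=
    List.Perm.eq_of_pairwise (fun a b _ _ h1 h2 => le_antisymm h2 h1) hDpair hGpair hDperm
  -- lengths
  have hLlen : L.length = k*k := by rw [hL]; simp
  have hGlen : (pvExpand G').length = k*k := by
    rw [← hDperm.length_eq, hDsc, List.length_reverse, (pvSortAsc_perm L).length_eq, hLlen]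
  -- assemble A's side
  have hA : maximumNumberOfOnes C R K m = ((pvExpand G').take m.toNat).sum := by
    unfold maximumNumberOfOnes
    simp only []
    rw [hloop, htally]
    have hlen : (PySem.List.pyRange 0 m).length ≤ (pvSortAsc L).length := by
      rw [PySem.List.length_pyRange_one, (pvSortAsc_perm L).length_eq, hLlen]
      omega
    rw [pvPopLoop _ _ 0 hlen, PySem.List.length_pyRange_one, ← hDsc]
    rw [show (m - 0).toNat = m.toNat by omega, hDeq]
    ring
  -- assemble B's side
  have hB : maximumNumberOfOnes_alt C R K m = ((pvExpand G').take m.toNat).sum := by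
    unfold maximumNumberOfOnes_alt
    simp only [hdvR, hdvC]
    rw [← hg0, ← hG']
    have hcnt : ∀ g ∈ G', 0 ≤ g.2 := by
      intro g hg
      rw [hG', PySem.List.mem_sorted, hg0] at hg
      simp only [List.mem_cons, List.not_mem_nil, or_false] at hg
      rcases hg with rfl | rfl | rfl | rfl <;> simp <;> nlinarith
    have hmlen : m ≤ ((pvExpand G').length : Int) := by
      rw [hGlen, ← hKK]
      exact hmK
    rw [pvGreedy G' hcnt m 0 hm0 hmlen]
    ring
  rw [Spec_maximumNumberOfOnes, hA, hB]
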